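-- pv_equiv track=rewrite | github.com/danish-stance-detectors/Stance | src/feature_extractor.py | special_words_in_text
-- ===== SOURCE A (Python) =====
-- def special_words_in_text(tokens, swear_words, negation_words):
--     swear_count = 0
--     negation_count = 0
--     for word in tokens:
--         if word in swear_words:
--             swear_count += 1
--
--         if word in negation_words:
--             negation_count += 1
--
--     return [swear_count, negation_count]
-- ===== SOURCE B (Python) =====
-- def special_words_in_text(tokens, swear_words, negation_words):
--     counts = {}
--     for w in tokens:
--         counts[w] = counts.get(w, 0) + 1
--
--     def total(words):
--         s = 0
--         for w, c in counts.items():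
--             if w in words:
--                 s += c
--         return s
--
--     return [total(swear_words), total(negation_words)]
-- ===== Notes on version B (the rewrite author's own statement) =====
-- stated objective: alternative
-- what changed: B builds a frequency table of the tokens in one pass and then computes each result with a separate recursive/sum helper over the table's distinct (word, count) items, instead of A's single loop testing every token occurrence against both word lists in a pair accumulator.
import Mathlib
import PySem

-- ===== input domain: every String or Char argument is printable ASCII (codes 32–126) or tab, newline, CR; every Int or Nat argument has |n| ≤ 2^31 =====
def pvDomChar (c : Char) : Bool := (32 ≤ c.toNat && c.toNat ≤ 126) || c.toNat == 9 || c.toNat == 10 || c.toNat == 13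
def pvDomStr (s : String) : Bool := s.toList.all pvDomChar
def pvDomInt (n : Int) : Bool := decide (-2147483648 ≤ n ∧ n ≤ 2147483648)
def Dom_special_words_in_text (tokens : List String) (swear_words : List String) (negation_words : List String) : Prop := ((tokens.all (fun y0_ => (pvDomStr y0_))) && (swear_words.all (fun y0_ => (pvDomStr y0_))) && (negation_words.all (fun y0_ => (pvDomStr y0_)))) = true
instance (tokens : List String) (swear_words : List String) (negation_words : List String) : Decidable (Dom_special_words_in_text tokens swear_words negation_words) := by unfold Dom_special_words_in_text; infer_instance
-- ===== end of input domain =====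

-- B stages the work: a one-pass frequency table of the tokens, then a reusable recursive total over its distinct (word, count) items per word list; alternative decomposition, same result.

-- ===== PORT A =====
def special_words_in_text (tokens : List String) (swear_words : List String) (negation_words : List String) : List Int :=
  let p := tokens.foldl
    (fun (acc : Int × Int) word =>
      (if swear_words.contains word then acc.1 + 1 else acc.1,
       if negation_words.contains word then acc.2 + 1 else acc.2))
    (0, 0)
  [p.1, p.2]

-- ===== PORT B =====
-- the inner 'total' loop of Source B: s starts at 0 and adds c for each (w, c) item with w in words
def pvTotalGo (words : List String) (s : Int) : List (String × Int) → Int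
  | [] => s
  | kc :: rest => pvTotalGo words (if words.contains kc.1 then s + kc.2 else s) rest

def special_words_in_text_alt (tokens : List String) (swear_words : List String) (negation_words : List String) : List Int :=
  -- counts[w] = counts.get(w, 0) + 1 over tokens
  let counts : PySem.Dict String Int :=
    tokens.foldl (fun d w => d.insert w (d.getD w 0 + 1)) PySem.Dict.empty
  [pvTotalGo swear_words 0 counts.items, pvTotalGo negation_words 0 counts.items]

-- ===== PRECONDITION & SPEC =====
def Spec_special_words_in_text (tokens : List String) (swear_words : List String) (negation_words : List String) (out : List Int) : Prop := out = special_words_in_text_alt tokens swear_words negation_words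
instance (tokens : List String) (swear_words : List String) (negation_words : List String) (out : List Int) : Decidable (Spec_special_words_in_text tokens swear_words negation_words out) := by unfold Spec_special_words_in_text; infer_instance

-- ===== CLAIM (what is proved, stated in full; the proofs are below) =====
def Claim_equal_special_words_in_text : Prop := ∀ (tokens : List String) (swear_words : List String) (negation_words : List String), Dom_special_words_in_text tokens swear_words negation_words → Spec_special_words_in_text tokens swear_words negation_words (special_words_in_text tokens swear_words negation_words)

-- ===== LEMMAS AND PROOFS =====

/-- A foldl whose state is a pair updated componentwise splits into two foldls. -/
theorem foldl_pair {β : Type} (l : List β) (f g : Int → β → Int) (a b : Int) :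
    l.foldl (fun (acc : Int × Int) x => (f acc.1 x, g acc.2 x)) (a, b)
      = (l.foldl f a, l.foldl g b) := by
  induction l generalizing a b with
  | nil => rfl
  | cons x xs ih => simpa using ih (f a x) (g b x)

/-- The accumulator loop of B's 'total' is its start plus a sum of conditional terms. -/
theorem pvTotalGo_eq_sum (words : List String) (s : Int) (l : List (String × Int)) :
    pvTotalGo words s l
      = s + (l.map (fun kc => if words.contains kc.1 then kc.2 else 0)).sum := by
  induction l generalizing s with
  | nil => simp [pvTotalGo]
  | cons kc rest ih =>
    simp only [pvTotalGo, List.map_cons, List.sum_cons, ih]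
    split <;> ring

/-- Splitting a countP at one value (Nat version). -/
theorem countP_split (tokens : List String) (p : String → Bool) (d : String) :
    tokens.countP p
      = (if p d then tokens.count d else 0)
        + (tokens.filter (fun x => !(x == d))).countP p := by
  induction tokens with
  | nil => simp
  | cons t ts ih =>
    by_cases htd : t = d
    · subst htd
      by_cases hp : p t <;>
        simp [hp, ih] <;> omega
    · have hbe : (t == d) = false := by simpa using htd
      by_cases hp : p t <;>
        simp [hp, hbe, htd, ih] <;> omega

/-- Summing conditional counts over any nodup list covering the tokens gives countP. -/
theorem sum_dedup_count (ds : List String) (p : String → Bool) :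
    ∀ (tokens : List String), ds.Nodup → (∀ k ∈ tokens, k ∈ ds) →
    (ds.map (fun k => if p k then (tokens.count k : Int) else 0)).sum
      = (tokens.countP p : Int) := by
  induction ds with
  | nil =>
    intro tokens _ hcov
    have : tokens = [] := List.eq_nil_iff_forall_not_mem.2 (fun x hx => by simpa using hcov x hx)
    simp [this]
  | cons d ds ih =>
    intro tokens hnd hcov
    have hdns : d ∉ ds := (List.nodup_cons.1 hnd).1
    have hnd' : ds.Nodup := (List.nodup_cons.1 hnd).2
    set t' := tokens.filter (fun x => !(x == d)) with ht'
    have hcov' : ∀ k ∈ t', k ∈ ds := by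
      intro k hk
      rcases List.mem_filter.1 hk with ⟨hk1, hk2⟩
      have hkd : k ≠ d := by simpa using hk2
      rcases List.mem_cons.1 (hcov k hk1) with h | h
      · exact absurd h hkd
      · exact h
    have hcnt : ∀ k ∈ ds, t'.count k = tokens.count k := by
      intro k hk
      have hkd : k ≠ d := fun h => hdns (h ▸ hk)
      rw [ht', List.count_filter]
      simp [hkd]
    have hmap : ds.map (fun k => if p k then (tokens.count k : Int) else 0)
        = ds.map (fun k => if p k then (t'.count k : Int) else 0) := by
      apply List.map_congr_left
      intro k hk
      rw [hcnt k hk]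
    have hih := ih t' hnd' hcov'
    have hsplit := countP_split tokens p d
    simp only [List.map_cons, List.sum_cons, hmap, hih]
    rw [hsplit]
    by_cases hp : p d <;> simp [hp, ht'] <;> push_cast <;> ring

/-- B's per-list total over the counter items equals countP over the tokens. -/
theorem total_counter_eq_countP (tokens S : List String) :
    pvTotalGo S 0 (PySem.Dict.counter tokens).items
      = (tokens.countP (fun w => S.contains w) : Int) := by
  rw [pvTotalGo_eq_sum, PySem.Dict.items_counter, List.map_map]
  have := sum_dedup_count (PySem.Set.ofList tokens) (fun w => S.contains w) tokens
    (PySem.Set.nodup_ofList tokens)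
    (fun k hk => (PySem.Set.mem_ofList tokens k).2 hk)
  simpa [Function.comp] using this

-- ===== VERDICT (by name: the statement is the Claim_ definition above) =====
theorem special_words_in_text_spec : Claim_equal_special_words_in_text := by
  intro tokens swear_words negation_words _
  unfold Spec_special_words_in_text special_words_in_text special_words_in_text_alt
  dsimp only
  rw [PySem.Dict.foldl_insert_getD_add_one_eq_counter]
  rw [foldl_pair tokens
        (fun a word => if swear_words.contains word then a + 1 else a)
        (fun a word => if negation_words.contains word then a + 1 else a) 0 0,
      PySem.List.foldl_count_if, PySem.List.foldl_count_if,
      total_counter_eq_countP, total_counter_eq_countP]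
  have hc : ∀ (S : List String),
      tokens.countP S.contains = tokens.countP (fun w => decide (w ∈ S)) :=
    fun S => List.countP_congr (fun x _ => by simp)
  rw [hc swear_words, hc negation_words]
  simp
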